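-- pv_equiv track=rewrite | github.com/Serversepp/DES | DES.py | shift2x
-- ===== SOURCE A (Python) =====
-- def shift2x(input1, input2, repetitions):
--     while repetitions != 0:
--         temp = input1[0]
--         input1 = input1[1:]
--         input1.append(temp)
--         temp = input2[0]
--         input2 = input2[1:]
--         input2.append(temp)
--         repetitions-=1  # Wdh werden runter gezaehlt
--     return input1, input2
-- ===== SOURCE B (Python) =====
-- def shift2x(input1, input2, repetitions):
--     def rot(xs):
--         if not xs:
--             return xs
--         k = repetitions % len(xs)
--         return xs[k:] + xs[:k]
--     return rot(input1), rot(input2)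
-- ===== Notes on version B (the rewrite author's own statement) =====
-- stated objective: faster
-- what changed: Replaces the element-by-element while loop (repetitions single-step rotations of both lists) with one slice rotation per list at offset repetitions % len.
import Mathlib
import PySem

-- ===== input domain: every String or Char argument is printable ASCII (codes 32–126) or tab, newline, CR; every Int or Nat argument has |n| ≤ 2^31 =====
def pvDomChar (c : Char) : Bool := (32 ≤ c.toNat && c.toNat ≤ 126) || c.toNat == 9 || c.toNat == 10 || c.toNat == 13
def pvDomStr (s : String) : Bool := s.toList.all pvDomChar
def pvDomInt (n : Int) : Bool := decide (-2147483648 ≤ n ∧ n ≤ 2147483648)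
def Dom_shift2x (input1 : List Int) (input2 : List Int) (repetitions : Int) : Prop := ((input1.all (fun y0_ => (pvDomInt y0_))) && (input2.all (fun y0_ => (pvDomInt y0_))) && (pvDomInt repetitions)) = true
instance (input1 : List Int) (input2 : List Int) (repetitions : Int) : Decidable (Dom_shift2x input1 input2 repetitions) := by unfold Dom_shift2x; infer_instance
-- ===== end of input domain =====

-- B replaces A's repeated one-step rotations with a single slice rotation per list (O(n) vs O(reps*n)).

-- ===== PORT A =====
-- while repetitions != 0: pop the head of each list and append it; count repetitions down.
-- The loop counts an Int down by 1, so for repetitions ≥ 0 it runs repetitions.toNat times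
-- (repetitions < 0 never terminates in Python; excluded by Pre_). The [] match arm is where
-- Python raises IndexError (input1[0] / input2[0] on an empty list); also excluded by Pre_.
def shift2xLoop : Nat → List Int → List Int → List Int × List Int
  | 0, l1, l2 => (l1, l2)
  | n + 1, l1, l2 =>
    match l1, l2 with
    | t1 :: r1, t2 :: r2 => shift2xLoop n (r1 ++ [t1]) (r2 ++ [t2])
    | _, _ => (l1, l2)

def shift2x (input1 : List Int) (input2 : List Int) (repetitions : Int) : List Int × List Int :=
  shift2xLoop repetitions.toNat input1 input2

-- ===== PORT B =====
-- rot xs = xs if xs is empty, else xs[k:] + xs[:k] with k = repetitions % len(xs)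
def rotAlt (repetitions : Int) (xs : List Int) : List Int :=
  if xs = [] then xs
  else
    let k := PySem.Int.mod repetitions (xs.length : Int)
    PySem.List.slice xs (some k) none ++ PySem.List.slice xs none (some k)

def shift2x_alt (input1 : List Int) (input2 : List Int) (repetitions : Int) : List Int × List Int :=
  (rotAlt repetitions input1, rotAlt repetitions input2)

-- ===== PRECONDITION & SPEC =====
-- Pre_ excludes repetitions < 0 (A's while loop never terminates) and repetitions > 0 with an
-- empty list (A raises IndexError on input[0]); on everything else A returns normally.
def Pre_shift2x (input1 : List Int) (input2 : List Int) (repetitions : Int) : Prop :=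
  0 ≤ repetitions ∧ (repetitions = 0 ∨ (input1 ≠ [] ∧ input2 ≠ []))
instance (input1 : List Int) (input2 : List Int) (repetitions : Int) : Decidable (Pre_shift2x input1 input2 repetitions) := by unfold Pre_shift2x; infer_instance

def pvWitness_shift2x : List Int × List Int × Int := ([1, 2, 3], [4, 5], 2)

def Spec_shift2x (input1 : List Int) (input2 : List Int) (repetitions : Int) (out : List Int × List Int) : Prop := out = shift2x_alt input1 input2 repetitions
instance (input1 : List Int) (input2 : List Int) (repetitions : Int) (out : List Int × List Int) : Decidable (Spec_shift2x input1 input2 repetitions out) := by unfold Spec_shift2x; infer_instance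

-- ===== CLAIM (what is proved, stated in full; the proofs are below) =====
def Claim_equal_shift2x : Prop := ∀ (input1 : List Int) (input2 : List Int) (repetitions : Int), Dom_shift2x input1 input2 repetitions → Pre_shift2x input1 input2 repetitions → Spec_shift2x input1 input2 repetitions (shift2x input1 input2 repetitions)

-- ===== LEMMAS AND PROOFS =====

-- A's loop performs n single-step left rotations of both lists.
theorem shift2xLoop_rotate (n : Nat) (l1 l2 : List Int) (h1 : l1 ≠ []) (h2 : l2 ≠ []) :
    shift2xLoop n l1 l2 = (l1.rotate n, l2.rotate n) := by
  induction n generalizing l1 l2 with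
  | zero => simp [shift2xLoop]
  | succ n ih =>
    match l1, l2 with
    | t1 :: r1, t2 :: r2 =>
      rw [shift2xLoop, ih (r1 ++ [t1]) (r2 ++ [t2]) (by simp) (by simp),
        List.rotate_cons_succ, List.rotate_cons_succ]

-- B's slice rotation equals List.rotate for a nonempty list and nonnegative repetitions.
theorem rotAlt_eq_rotate (reps : Int) (xs : List Int) (hx : xs ≠ []) (hr : 0 ≤ reps) :
    rotAlt reps xs = xs.rotate reps.toNat := by
  have hlen : 0 < xs.length := List.length_pos_iff.mpr hx
  obtain ⟨m, rfl⟩ : ∃ m : Nat, reps = (m : Int) := ⟨reps.toNat, (Int.toNat_of_nonneg hr).symm⟩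
  rw [rotAlt, if_neg hx]
  have hmod : PySem.Int.mod (m : Int) (xs.length : Int) = ((m % xs.length : Nat) : Int) :=
    PySem.Int.mod_natCast m xs.length
  simp only [hmod, PySem.List.slice_from_natCast, PySem.List.slice_to_natCast]
  rw [Int.toNat_natCast, ← List.rotate_mod, List.rotate_eq_drop_append_take (Nat.le_of_lt (Nat.mod_lt m hlen))]

-- ===== VERDICT (by name: the statement is the Claim_ definition above) =====
theorem shift2x_spec : Claim_equal_shift2x := by
  intro l1 l2 reps _ hpre
  obtain ⟨hr, hcase⟩ := hpre
  unfold Spec_shift2x shift2x shift2x_alt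
  rcases hcase with rfl | ⟨h1, h2⟩
  · cases l1 <;> cases l2 <;> simp [shift2xLoop, rotAlt, PySem.Int.mod,
      PySem.List.slice, PySem.List.clampIdx]
  · rw [shift2xLoop_rotate reps.toNat l1 l2 h1 h2,
      rotAlt_eq_rotate reps l1 h1 hr, rotAlt_eq_rotate reps l2 h2 hr]
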